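-- pv_equiv track=rewrite | github.com/MonitSharma/diskit | distributed_qiskit/circuit_remapper.py | collate_measurements
-- ===== SOURCE A (Python) =====
-- def collate_measurements(sim_results:dict, num_qubits:int):
--     """
--     Collate the measurements from the simulation results
--     Args:
--         sim_results: simulation results from the simulator
--         num_qubits: number of qubits in the circuit
--     Returns: A dictionary of measurements
--     """
--     sim_dict = {}
--     for key in sim_results.keys():
--         new_key = key[0:num_qubits]
--         if new_key not in sim_dict.keys():
--             sim_dict[new_key] = sim_results[key]
--         else:
--             sim_dict[new_key] += sim_results[key]
--
--     return sim_dict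
-- ===== SOURCE B (Python) =====
-- def collate_measurements(sim_results: dict, num_qubits: int):
--     """Truncate every key, list the distinct truncated keys in first-occurrence
--     order, and build the result by summing all values per truncated key."""
--     items = [(key[0:num_qubits], value) for key, value in sim_results.items()]
--     return {new_key: sum(v for k, v in items if k == new_key)
--             for new_key in dict.fromkeys(k for k, _ in items)}
-- ===== Notes on version B (the rewrite author's own statement) =====
-- stated objective: alternative
-- what changed: Replaces A's single-pass dict accumulation (insert-or-increment while iterating) with a two-phase grouping: first materialise the (truncated key, value) pairs, then build the result as a comprehension over the ordered distinct truncated keys, summing the matching values per key with an inner scan.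
import Mathlib
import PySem

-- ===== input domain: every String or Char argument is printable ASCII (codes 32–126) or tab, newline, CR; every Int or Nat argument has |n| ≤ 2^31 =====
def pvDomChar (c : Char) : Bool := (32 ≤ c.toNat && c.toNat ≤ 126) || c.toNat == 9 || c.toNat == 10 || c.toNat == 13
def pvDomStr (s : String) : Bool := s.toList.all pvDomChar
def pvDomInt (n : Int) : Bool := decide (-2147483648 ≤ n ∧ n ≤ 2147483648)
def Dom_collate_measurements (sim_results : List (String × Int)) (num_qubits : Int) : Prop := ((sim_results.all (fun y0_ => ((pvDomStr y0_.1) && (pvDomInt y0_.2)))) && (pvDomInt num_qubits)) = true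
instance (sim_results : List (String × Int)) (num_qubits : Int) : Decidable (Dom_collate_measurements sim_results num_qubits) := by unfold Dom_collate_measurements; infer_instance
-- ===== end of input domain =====

-- B replaces A's running insert-or-increment dict accumulation by a two-phase grouping
-- (collect truncated pairs, then one summed entry per ordered distinct truncated key): an
-- alternative decomposition, not claimed faster.

-- ===== PORT A =====
-- one iteration of A's loop body: new_key = key[0:num_qubits]; branch on membership
def collate_step (num_qubits : Int) (sim_dict : PySem.Dict String Int) (kv : String × Int) : PySem.Dict String Int :=
  let new_key := PySem.Str.slice kv.1 (some 0) (some num_qubits)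
  if sim_dict.contains new_key = false then
    sim_dict.insert new_key kv.2
  else
    sim_dict.insert new_key (sim_dict.getD new_key 0 + kv.2)

def collate_measurements (sim_results : List (String × Int)) (num_qubits : Int) : List (String × Int) :=
  (sim_results.foldl (collate_step num_qubits) PySem.Dict.empty).items

-- ===== PORT B =====
def collate_measurements_alt (sim_results : List (String × Int)) (num_qubits : Int) : List (String × Int) :=
  let items := sim_results.map (fun kv => (PySem.Str.slice kv.1 (some 0) (some num_qubits), kv.2))
  (PySem.List.dedup (items.map Prod.fst)).map
    (fun new_key => (new_key, ((items.filter (fun p => p.1 == new_key)).map Prod.snd).sum))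

-- ===== PRECONDITION & SPEC =====
def Spec_collate_measurements (sim_results : List (String × Int)) (num_qubits : Int) (out : List (String × Int)) : Prop := out = collate_measurements_alt sim_results num_qubits
instance (sim_results : List (String × Int)) (num_qubits : Int) (out : List (String × Int)) : Decidable (Spec_collate_measurements sim_results num_qubits out) := by unfold Spec_collate_measurements; infer_instance

-- ===== CLAIM (what is proved, stated in full; the proofs are below) =====
def Claim_equal_collate_measurements : Prop := ∀ (sim_results : List (String × Int)) (num_qubits : Int), Dom_collate_measurements sim_results num_qubits → Spec_collate_measurements sim_results num_qubits (collate_measurements sim_results num_qubits)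

-- ===== LEMMAS AND PROOFS =====

-- A's loop step written as a single insert of a conditional value
theorem collate_step_eq (num_qubits : Int) :
    collate_step num_qubits = fun (d : PySem.Dict String Int) (kv : String × Int) =>
      d.insert (PySem.Str.slice kv.1 (some 0) (some num_qubits))
        (if d.contains (PySem.Str.slice kv.1 (some 0) (some num_qubits)) = false then kv.2
         else d.getD (PySem.Str.slice kv.1 (some 0) (some num_qubits)) 0 + kv.2) := by
  funext d kv
  unfold collate_step
  by_cases h : d.contains (PySem.Str.slice kv.1 (some 0) (some num_qubits)) = false <;>
    simp [h]

-- getD of A's fold: running total = initial total + sum of the matching values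
theorem getD_fold_step {α : Type} (key : α → String) (val : α → Int) :
    ∀ (l : List α) (d : PySem.Dict String Int) (c : String),
    (l.foldl (fun d p => d.insert (key p)
        (if d.contains (key p) = false then val p else d.getD (key p) 0 + val p)) d).getD c 0
      = d.getD c 0 + ((l.filter (fun p => key p == c)).map val).sum := by
  intro l
  induction l with
  | nil => intro d c; simp
  | cons p l ih =>
    intro d c
    simp only [List.foldl_cons, List.filter_cons]
    rw [ih]
    by_cases hc : key p = c
    · subst hc
      have hval : (if d.contains (key p) = false then val p
          else d.getD (key p) 0 + val p) = d.getD (key p) 0 + val p := by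
        by_cases h : d.contains (key p) = false
        · rw [if_pos h, PySem.Dict.getD_of_not_contains d 0 h, zero_add]
        · rw [if_neg h]
      rw [hval, PySem.Dict.getD_insert_self]
      simp [add_assoc]
    · rw [PySem.Dict.getD_insert_of_ne _ _ _ (Ne.symm hc)]
      have : (key p == c) = false := by simp [hc]
      simp [this]

-- characterisation of A's result: dict items = distinct truncated keys with their sums
theorem collate_measurements_items (sim_results : List (String × Int)) (num_qubits : Int) :
    collate_measurements sim_results num_qubits
      = (PySem.List.dedup (sim_results.map (fun kv => PySem.Str.slice kv.1 (some 0) (some num_qubits)))).map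
          (fun c => (c, ((sim_results.filter
              (fun p => PySem.Str.slice p.1 (some 0) (some num_qubits) == c)).map Prod.snd).sum)) := by
  unfold collate_measurements
  rw [collate_step_eq]
  have hnd : (sim_results.foldl (fun (d : PySem.Dict String Int) (kv : String × Int) =>
      d.insert (PySem.Str.slice kv.1 (some 0) (some num_qubits))
        (if d.contains (PySem.Str.slice kv.1 (some 0) (some num_qubits)) = false then kv.2
         else d.getD (PySem.Str.slice kv.1 (some 0) (some num_qubits)) 0 + kv.2)) PySem.Dict.empty).keys.Nodup := by
    exact PySem.Dict.nodup_keys_foldl_insert_key sim_results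
      (fun kv => PySem.Str.slice kv.1 (some 0) (some num_qubits)) _ PySem.Dict.empty
      PySem.Dict.nodup_keys_empty
  rw [PySem.Dict.items_eq_map_keys _ hnd 0]
  rw [PySem.Dict.keys_foldl_insert_key]
  rw [PySem.Dict.keys_empty, PySem.Set.update_nil_left]
  rw [PySem.List.dedup_eq_ofList]
  apply List.map_congr_left
  intro c _
  rw [getD_fold_step (fun kv => PySem.Str.slice kv.1 (some 0) (some num_qubits)) Prod.snd
      sim_results PySem.Dict.empty c]
  simp

-- ===== VERDICT (by name: the statement is the Claim_ definition above) =====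
theorem collate_measurements_spec : Claim_equal_collate_measurements := by
  intro sim_results num_qubits _
  unfold Spec_collate_measurements collate_measurements_alt
  rw [collate_measurements_items]
  simp only [List.map_map]
  apply List.map_congr_left
  intro c _
  simp [List.filter_map, Function.comp_def]
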